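-- pv_equiv track=rewrite | github.com/get2knowio/maverick | src/maverick/tui/widgets/shortcut_footer.py | _format_key
-- ===== SOURCE A (Python) =====
-- def _format_key(key: str) -> str:
--     """Format a key string for display.
--
--     Args:
--         key: Raw key string.
--
--     Returns:
--         Formatted key string.
--     """
--     replacements = {
--         "ctrl+": "C-",
--         "shift+": "S-",
--         "alt+": "A-",
--         "escape": "Esc",
--         "enter": "Enter",
--         "tab": "Tab",
--     }
--
--     result = key
--     for old, new in replacements.items():
--         result = result.replace(old, new)
--
--     # Capitalize single letter keys
--     if len(result) == 1:
--         result = result.upper()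
--
--     return result
-- ===== SOURCE B (Python) =====
-- def _format_key(key: str) -> str:
--     """Format a key string for display (single left-to-right scan)."""
--     table = (
--         ("ctrl+", "C-"),
--         ("shift+", "S-"),
--         ("alt+", "A-"),
--         ("escape", "Esc"),
--         ("enter", "Enter"),
--         ("tab", "Tab"),
--     )
--     out = []
--     i = 0
--     n = len(key)
--     while i < n:
--         for old, new in table:
--             if key.startswith(old, i):
--                 out.append(new)
--                 i += len(old)
--                 break
--         else:
--             out.append(key[i])
--             i += 1
--     result = "".join(out)
--     if len(result) == 1:
--         result = result.upper()
--     return result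
-- ===== Notes on version B (the rewrite author's own statement) =====
-- stated objective: alternative
-- what changed: Replaces A's six sequential whole-string replace passes (one per mapping entry, each allocating an intermediate string) by a single left-to-right scan that at each position tries the six keys in table order and copies or substitutes once.
import Mathlib
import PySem

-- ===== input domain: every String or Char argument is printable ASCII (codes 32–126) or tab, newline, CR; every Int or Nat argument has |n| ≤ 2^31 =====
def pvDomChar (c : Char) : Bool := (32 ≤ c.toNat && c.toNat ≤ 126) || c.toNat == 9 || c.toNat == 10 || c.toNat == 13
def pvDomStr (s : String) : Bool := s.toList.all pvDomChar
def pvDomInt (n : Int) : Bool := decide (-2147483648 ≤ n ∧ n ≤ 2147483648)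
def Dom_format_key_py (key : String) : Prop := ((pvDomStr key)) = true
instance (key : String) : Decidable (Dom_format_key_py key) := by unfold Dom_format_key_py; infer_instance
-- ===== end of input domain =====

-- B replaces A's six sequential full-string replace passes by ONE left-to-right scan that tries the
-- six keys in dict order at each position (equivalent because no replacement output re-creates a key
-- occurrence); objective: alternative single-pass structure.

-- ===== PORT A =====
def format_key_py (key : String) : String :=
  let replacements : PySem.Dict String String := PySem.Dict.mk
    [("ctrl+", "C-"), ("shift+", "S-"), ("alt+", "A-"),
     ("escape", "Esc"), ("enter", "Enter"), ("tab", "Tab")]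
  let result := replacements.items.foldl
    (fun result p => PySem.Str.replace result p.1 p.2) key
  if PySem.Str.len result == 1 then PySem.Str.upper result else result

-- ===== PORT B =====
-- the while-loop of Source B: at each position try the table keys in order (the for/else), else copy the char
def fkScan : List Char → List Char
  | [] => []
  | c :: t =>
    if List.isPrefixOf ['c','t','r','l','+'] (c :: t) then ['C','-'] ++ fkScan (t.drop 4)
    else if List.isPrefixOf ['s','h','i','f','t','+'] (c :: t) then ['S','-'] ++ fkScan (t.drop 5)
    else if List.isPrefixOf ['a','l','t','+'] (c :: t) then ['A','-'] ++ fkScan (t.drop 3)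
    else if List.isPrefixOf ['e','s','c','a','p','e'] (c :: t) then ['E','s','c'] ++ fkScan (t.drop 5)
    else if List.isPrefixOf ['e','n','t','e','r'] (c :: t) then ['E','n','t','e','r'] ++ fkScan (t.drop 4)
    else if List.isPrefixOf ['t','a','b'] (c :: t) then ['T','a','b'] ++ fkScan (t.drop 2)
    else c :: fkScan t
termination_by l => l.length
decreasing_by all_goals simp [List.length_drop]

def format_key_py_alt (key : String) : String :=
  let result := String.ofList (fkScan key.toList)
  if PySem.Str.len result == 1 then PySem.Str.upper result else result

-- ===== PRECONDITION & SPEC =====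
def Spec_format_key_py (key : String) (out : String) : Prop := out = format_key_py_alt key
instance (key : String) (out : String) : Decidable (Spec_format_key_py key out) := by unfold Spec_format_key_py; infer_instance

-- ===== CLAIM (what is proved, stated in full; the proofs are below) =====
def Claim_equal_format_key_py : Prop := ∀ (key : String), Dom_format_key_py key → Spec_format_key_py key (format_key_py key)

-- ===== LEMMAS AND PROOFS =====

-- A's six replace passes, on char lists
def fkA6 (s : List Char) : List Char :=
  PySem.Chars.replace
    (PySem.Chars.replace
      (PySem.Chars.replace
        (PySem.Chars.replace
          (PySem.Chars.replace
            (PySem.Chars.replace s ['c','t','r','l','+'] ['C','-'])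
            ['s','h','i','f','t','+'] ['S','-'])
          ['a','l','t','+'] ['A','-'])
        ['e','s','c','a','p','e'] ['E','s','c'])
      ['e','n','t','e','r'] ['E','n','t','e','r'])
    ['t','a','b'] ['T','a','b']

lemma go_acc (old new : List Char) (hold : old ≠ []) :
    ∀ (fuel : Nat) (l acc : List Char), l.length ≤ fuel →
      PySem.Chars.replace.go old new fuel l acc
        = acc.reverse ++ PySem.Chars.replace.go old new l.length l [] := by
  intro fuel
  induction fuel using Nat.strong_induction_on with
  | _ fuel ih =>
    intro l acc hlen
    match fuel, l with
    | 0, l =>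
      have : l = [] := List.eq_nil_of_length_eq_zero (by omega)
      subst this; simp [PySem.Chars.replace.go]
    | fuel+1, [] => simp [PySem.Chars.replace.go]
    | fuel+1, c :: t =>
      have hfuel : t.length ≤ fuel := by simpa using hlen
      by_cases hpre : old.isPrefixOf (c :: t) = true
      · have hlt : (List.drop old.length (c :: t)).length ≤ t.length := by
          cases old with
          | nil => exact absurd rfl hold
          | cons o old' => simp [List.length_drop]
        simp only [PySem.Chars.replace.go, hpre, if_true, List.length_cons]
        rw [ih fuel (by omega) _ _ (le_trans hlt hfuel),
            ih t.length (by omega) _ _ hlt]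
        simp
      · simp only [PySem.Chars.replace.go, hpre, if_false, List.length_cons, Bool.false_eq_true]
        rw [ih fuel (by omega) _ _ hfuel, ih t.length (by omega) t ([c]) le_rfl]
        simp

lemma rep_nil (old new : List Char) (hold : old ≠ []) :
    PySem.Chars.replace [] old new = [] := by
  cases old with
  | nil => exact absurd rfl hold
  | cons o old' => simp [PySem.Chars.replace, PySem.Chars.replace.go]

lemma rep_cons_neg (old new : List Char) (hold : old ≠ []) (c : Char) (t : List Char)
    (h : old.isPrefixOf (c :: t) = false) :
    PySem.Chars.replace (c :: t) old new = c :: PySem.Chars.replace t old new := by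
  cases old with
  | nil => exact absurd rfl hold
  | cons o old' =>
    simp only [PySem.Chars.replace, List.isEmpty_cons, if_false, Bool.false_eq_true,
      List.length_cons]
    simp only [PySem.Chars.replace.go, h, if_false, Bool.false_eq_true]
    rw [go_acc _ _ hold t.length t [c] le_rfl]
    simp

lemma rep_pos (old new s : List Char) (hold : old ≠ []) (h : old.isPrefixOf s = true) :
    PySem.Chars.replace s old new = new ++ PySem.Chars.replace (s.drop old.length) old new := by
  cases old with
  | nil => exact absurd rfl hold
  | cons o old' =>
    cases s with
    | nil => simp [List.isPrefixOf] at h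
    | cons c t =>
      have hlt : (List.drop (o :: old').length (c :: t)).length ≤ t.length := by
        simp [List.length_drop]
      simp only [PySem.Chars.replace, List.isEmpty_cons, if_false, Bool.false_eq_true,
        List.length_cons]
      simp only [PySem.Chars.replace.go, h, if_true]
      rw [go_acc _ _ hold t.length _ _ hlt]
      rw [go_acc _ _ hold (List.drop (o :: old').length (c :: t)).length _ _ le_rfl]
      simp

lemma compat : ∀ (q old : List Char), (old.isPrefixOf q || q.isPrefixOf old) = false →
    ∀ u, old.isPrefixOf (q ++ u) = false := by
  intro q
  induction q with
  | nil => intro old h; simp [List.isPrefixOf] at h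
  | cons c q' ih =>
    intro old h u
    cases old with
    | nil => simp [List.isPrefixOf] at h
    | cons o old' =>
      simp only [List.isPrefixOf, Bool.or_eq_false_iff, Bool.and_eq_false_iff] at h
      rcases h with ⟨h1, h2⟩
      by_cases hoc : (o == c) = true
      · have hco : (c == o) = true := by simp at hoc ⊢; exact hoc.symm
        have h1' : old'.isPrefixOf q' = false := by
          rcases h1 with h | h
          · rw [hoc] at h; simp at h
          · exact h
        have h2' : q'.isPrefixOf old' = false := by
          rcases h2 with h | h
          · rw [hco] at h; simp at h
          · exact h
        simp only [List.cons_append, List.isPrefixOf, hoc, Bool.true_and]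
        exact ih old' (by rw [h1', h2']; rfl) u
      · simp only [List.cons_append, List.isPrefixOf, Bool.and_eq_false_iff]
        left
        simpa using hoc

lemma rep_pass (old new : List Char) (hold : old ≠ []) :
    ∀ (p : List Char), (∀ q ∈ p.tails, q ≠ [] → (old.isPrefixOf q || q.isPrefixOf old) = false) →
    ∀ u, PySem.Chars.replace (p ++ u) old new = p ++ PySem.Chars.replace u old new := by
  intro p
  induction p with
  | nil => intro _ u; simp
  | cons c p' ih =>
    intro hp u
    have h1 : old.isPrefixOf ((c :: p') ++ u) = false :=
      compat (c :: p') old (hp (c :: p') (by simp [List.mem_tails]) (by simp)) u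
    rw [List.cons_append, rep_cons_neg old new hold c (p' ++ u) (by simpa using h1)]
    rw [ih (fun q hq hne => hp q (by
      rw [List.mem_tails] at hq ⊢
      exact hq.trans (List.suffix_cons c p')) hne) u]
    rfl

lemma rep_trans (old : List Char) (hold : old ≠ []) (d : Char) (v' : List Char) :
    ∀ (n : Nat) (u p : List Char), u.length ≤ n → d ∉ p →
      p.isPrefixOf (PySem.Chars.replace u old (d :: v')) = true → p.isPrefixOf u = true := by
  intro n
  induction n with
  | zero =>
    intro u p hu hd h
    have : u = [] := List.eq_nil_of_length_eq_zero (by omega)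
    subst this
    rwa [rep_nil _ _ hold] at h
  | succ n ih =>
    intro u p hu hd h
    by_cases hpre : old.isPrefixOf u = true
    · rw [rep_pos old (d :: v') u hold hpre] at h
      cases p with
      | nil => rfl
      | cons e p' =>
        simp only [List.cons_append, List.isPrefixOf, Bool.and_eq_true, beq_iff_eq] at h
        exact absurd (h.1 ▸ (List.mem_cons_self : e ∈ e :: p')) hd
    · cases u with
      | nil => rwa [rep_nil _ _ hold] at h
      | cons c t =>
        rw [rep_cons_neg old (d :: v') hold c t (Bool.not_eq_true _ ▸ hpre)] at h
        cases p with
        | nil => rfl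
        | cons e p' =>
          simp only [List.isPrefixOf, Bool.and_eq_true] at h ⊢
          exact ⟨h.1, ih t p' (by simpa using hu) (fun hm => hd (List.mem_cons_of_mem e hm)) h.2⟩

lemma rep_self_append (old new : List Char) (hold : old ≠ []) (u : List Char) :
    PySem.Chars.replace (old ++ u) old new = new ++ PySem.Chars.replace u old new := by
  rw [rep_pos old new (old ++ u) hold (by rw [List.isPrefixOf_iff_prefix]; exact List.prefix_append _ _),
      List.drop_left]

lemma fkScan_cons (c : Char) (t : List Char) : fkScan (c :: t) =
    (if List.isPrefixOf ['c', 't', 'r', 'l', '+'] (c :: t) then ['C', '-'] ++ fkScan (t.drop 4)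
     else if List.isPrefixOf ['s', 'h', 'i', 'f', 't', '+'] (c :: t) then ['S', '-'] ++ fkScan (t.drop 5)
     else if List.isPrefixOf ['a', 'l', 't', '+'] (c :: t) then ['A', '-'] ++ fkScan (t.drop 3)
     else if List.isPrefixOf ['e', 's', 'c', 'a', 'p', 'e'] (c :: t) then ['E', 's', 'c'] ++ fkScan (t.drop 5)
     else if List.isPrefixOf ['e', 'n', 't', 'e', 'r'] (c :: t) then ['E', 'n', 't', 'e', 'r'] ++ fkScan (t.drop 4)
     else if List.isPrefixOf ['t', 'a', 'b'] (c :: t) then ['T', 'a', 'b'] ++ fkScan (t.drop 2)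
     else c :: fkScan t) := by
  rw [fkScan]

lemma fk_main : ∀ (n : Nat) (s : List Char), s.length ≤ n → fkA6 s = fkScan s := by
  intro n
  induction n with
  | zero =>
    intro s hs
    have hnil : s = [] := List.eq_nil_of_length_eq_zero (by omega)
    subst hnil
    simp [fkA6, fkScan, rep_nil]
  | succ n ih =>
    intro s hs
    cases s with
    | nil => simp [fkA6, fkScan, rep_nil]
    | cons c t =>
      have ht : t.length ≤ n := by simpa using hs
      by_cases h1 : List.isPrefixOf ['c', 't', 'r', 'l', '+'] (c :: t) = true
      · have hscan : fkScan (c :: t) = ['C', '-'] ++ fkScan (List.drop 4 t) := by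
          rw [fkScan_cons]
          simp [h1]
        have hseq : c :: t = ['c', 't', 'r', 'l', '+'] ++ List.drop 4 t := by
          have hp := List.prefix_iff_eq_append.1 (List.isPrefixOf_iff_prefix.1 h1)
          simpa using hp.symm
        rw [hscan, hseq]
        simp only [fkA6]
        rw [rep_self_append ['c', 't', 'r', 'l', '+'] ['C', '-'] (by decide),
            rep_pass ['s', 'h', 'i', 'f', 't', '+'] ['S', '-'] (by decide) ['C', '-'] (by decide),
            rep_pass ['a', 'l', 't', '+'] ['A', '-'] (by decide) ['C', '-'] (by decide),
            rep_pass ['e', 's', 'c', 'a', 'p', 'e'] ['E', 's', 'c'] (by decide) ['C', '-'] (by decide),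
            rep_pass ['e', 'n', 't', 'e', 'r'] ['E', 'n', 't', 'e', 'r'] (by decide) ['C', '-'] (by decide),
            rep_pass ['t', 'a', 'b'] ['T', 'a', 'b'] (by decide) ['C', '-'] (by decide)]
        have hiht := ih (List.drop 4 t) (by simp [List.length_drop]; omega)
        simp only [fkA6] at hiht
        rw [hiht]
      ·
        by_cases h2 : List.isPrefixOf ['s', 'h', 'i', 'f', 't', '+'] (c :: t) = true
        · have hscan : fkScan (c :: t) = ['S', '-'] ++ fkScan (List.drop 5 t) := by
            rw [fkScan_cons]
            simp [h1, h2]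
          have hseq : c :: t = ['s', 'h', 'i', 'f', 't', '+'] ++ List.drop 5 t := by
            have hp := List.prefix_iff_eq_append.1 (List.isPrefixOf_iff_prefix.1 h2)
            simpa using hp.symm
          rw [hscan, hseq]
          simp only [fkA6]
          rw [rep_pass ['c', 't', 'r', 'l', '+'] ['C', '-'] (by decide) ['s', 'h', 'i', 'f', 't', '+'] (by decide),
              rep_self_append ['s', 'h', 'i', 'f', 't', '+'] ['S', '-'] (by decide),
              rep_pass ['a', 'l', 't', '+'] ['A', '-'] (by decide) ['S', '-'] (by decide),
              rep_pass ['e', 's', 'c', 'a', 'p', 'e'] ['E', 's', 'c'] (by decide) ['S', '-'] (by decide),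
              rep_pass ['e', 'n', 't', 'e', 'r'] ['E', 'n', 't', 'e', 'r'] (by decide) ['S', '-'] (by decide),
              rep_pass ['t', 'a', 'b'] ['T', 'a', 'b'] (by decide) ['S', '-'] (by decide)]
          have hiht := ih (List.drop 5 t) (by simp [List.length_drop]; omega)
          simp only [fkA6] at hiht
          rw [hiht]
        ·
          by_cases h3 : List.isPrefixOf ['a', 'l', 't', '+'] (c :: t) = true
          · have hscan : fkScan (c :: t) = ['A', '-'] ++ fkScan (List.drop 3 t) := by
              rw [fkScan_cons]
              simp [h1, h2, h3]
            have hseq : c :: t = ['a', 'l', 't', '+'] ++ List.drop 3 t := by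
              have hp := List.prefix_iff_eq_append.1 (List.isPrefixOf_iff_prefix.1 h3)
              simpa using hp.symm
            rw [hscan, hseq]
            simp only [fkA6]
            rw [rep_pass ['c', 't', 'r', 'l', '+'] ['C', '-'] (by decide) ['a', 'l', 't', '+'] (by decide),
                rep_pass ['s', 'h', 'i', 'f', 't', '+'] ['S', '-'] (by decide) ['a', 'l', 't', '+'] (by decide),
                rep_self_append ['a', 'l', 't', '+'] ['A', '-'] (by decide),
                rep_pass ['e', 's', 'c', 'a', 'p', 'e'] ['E', 's', 'c'] (by decide) ['A', '-'] (by decide),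
                rep_pass ['e', 'n', 't', 'e', 'r'] ['E', 'n', 't', 'e', 'r'] (by decide) ['A', '-'] (by decide),
                rep_pass ['t', 'a', 'b'] ['T', 'a', 'b'] (by decide) ['A', '-'] (by decide)]
            have hiht := ih (List.drop 3 t) (by simp [List.length_drop]; omega)
            simp only [fkA6] at hiht
            rw [hiht]
          ·
            by_cases h4 : List.isPrefixOf ['e', 's', 'c', 'a', 'p', 'e'] (c :: t) = true
            · have hscan : fkScan (c :: t) = ['E', 's', 'c'] ++ fkScan (List.drop 5 t) := by
                rw [fkScan_cons]
                simp [h1, h2, h3, h4]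
              have hseq : c :: t = ['e', 's', 'c', 'a', 'p', 'e'] ++ List.drop 5 t := by
                have hp := List.prefix_iff_eq_append.1 (List.isPrefixOf_iff_prefix.1 h4)
                simpa using hp.symm
              rw [hscan, hseq]
              simp only [fkA6]
              rw [rep_pass ['c', 't', 'r', 'l', '+'] ['C', '-'] (by decide) ['e', 's', 'c', 'a', 'p', 'e'] (by decide),
                  rep_pass ['s', 'h', 'i', 'f', 't', '+'] ['S', '-'] (by decide) ['e', 's', 'c', 'a', 'p', 'e'] (by decide),
                  rep_pass ['a', 'l', 't', '+'] ['A', '-'] (by decide) ['e', 's', 'c', 'a', 'p', 'e'] (by decide),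
                  rep_self_append ['e', 's', 'c', 'a', 'p', 'e'] ['E', 's', 'c'] (by decide),
                  rep_pass ['e', 'n', 't', 'e', 'r'] ['E', 'n', 't', 'e', 'r'] (by decide) ['E', 's', 'c'] (by decide),
                  rep_pass ['t', 'a', 'b'] ['T', 'a', 'b'] (by decide) ['E', 's', 'c'] (by decide)]
              have hiht := ih (List.drop 5 t) (by simp [List.length_drop]; omega)
              simp only [fkA6] at hiht
              rw [hiht]
            ·
              by_cases h5 : List.isPrefixOf ['e', 'n', 't', 'e', 'r'] (c :: t) = true
              · have hscan : fkScan (c :: t) = ['E', 'n', 't', 'e', 'r'] ++ fkScan (List.drop 4 t) := by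
                  rw [fkScan_cons]
                  simp [h1, h2, h3, h4, h5]
                have hseq : c :: t = ['e', 'n', 't', 'e', 'r'] ++ List.drop 4 t := by
                  have hp := List.prefix_iff_eq_append.1 (List.isPrefixOf_iff_prefix.1 h5)
                  simpa using hp.symm
                rw [hscan, hseq]
                simp only [fkA6]
                rw [rep_pass ['c', 't', 'r', 'l', '+'] ['C', '-'] (by decide) ['e', 'n', 't', 'e', 'r'] (by decide),
                    rep_pass ['s', 'h', 'i', 'f', 't', '+'] ['S', '-'] (by decide) ['e', 'n', 't', 'e', 'r'] (by decide),
                    rep_pass ['a', 'l', 't', '+'] ['A', '-'] (by decide) ['e', 'n', 't', 'e', 'r'] (by decide),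
                    rep_pass ['e', 's', 'c', 'a', 'p', 'e'] ['E', 's', 'c'] (by decide) ['e', 'n', 't', 'e', 'r'] (by decide),
                    rep_self_append ['e', 'n', 't', 'e', 'r'] ['E', 'n', 't', 'e', 'r'] (by decide),
                    rep_pass ['t', 'a', 'b'] ['T', 'a', 'b'] (by decide) ['E', 'n', 't', 'e', 'r'] (by decide)]
                have hiht := ih (List.drop 4 t) (by simp [List.length_drop]; omega)
                simp only [fkA6] at hiht
                rw [hiht]
              ·
                by_cases h6 : List.isPrefixOf ['t', 'a', 'b'] (c :: t) = true
                · have hscan : fkScan (c :: t) = ['T', 'a', 'b'] ++ fkScan (List.drop 2 t) := by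
                    rw [fkScan_cons]
                    simp [h1, h2, h3, h4, h5, h6]
                  have hseq : c :: t = ['t', 'a', 'b'] ++ List.drop 2 t := by
                    have hp := List.prefix_iff_eq_append.1 (List.isPrefixOf_iff_prefix.1 h6)
                    simpa using hp.symm
                  rw [hscan, hseq]
                  simp only [fkA6]
                  rw [rep_pass ['c', 't', 'r', 'l', '+'] ['C', '-'] (by decide) ['t', 'a', 'b'] (by decide),
                      rep_pass ['s', 'h', 'i', 'f', 't', '+'] ['S', '-'] (by decide) ['t', 'a', 'b'] (by decide),
                      rep_pass ['a', 'l', 't', '+'] ['A', '-'] (by decide) ['t', 'a', 'b'] (by decide),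
                      rep_pass ['e', 's', 'c', 'a', 'p', 'e'] ['E', 's', 'c'] (by decide) ['t', 'a', 'b'] (by decide),
                      rep_pass ['e', 'n', 't', 'e', 'r'] ['E', 'n', 't', 'e', 'r'] (by decide) ['t', 'a', 'b'] (by decide),
                      rep_self_append ['t', 'a', 'b'] ['T', 'a', 'b'] (by decide)]
                  have hiht := ih (List.drop 2 t) (by simp [List.length_drop]; omega)
                  simp only [fkA6] at hiht
                  rw [hiht]
                ·
                  have hF1 : List.isPrefixOf ['c', 't', 'r', 'l', '+'] (c :: t) = false := Bool.eq_false_iff.mpr h1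
                  have hF2 : List.isPrefixOf ['s', 'h', 'i', 'f', 't', '+'] (c :: t) = false := Bool.eq_false_iff.mpr h2
                  have hF3 : List.isPrefixOf ['a', 'l', 't', '+'] (c :: t) = false := Bool.eq_false_iff.mpr h3
                  have hF4 : List.isPrefixOf ['e', 's', 'c', 'a', 'p', 'e'] (c :: t) = false := Bool.eq_false_iff.mpr h4
                  have hF5 : List.isPrefixOf ['e', 'n', 't', 'e', 'r'] (c :: t) = false := Bool.eq_false_iff.mpr h5
                  have hF6 : List.isPrefixOf ['t', 'a', 'b'] (c :: t) = false := Bool.eq_false_iff.mpr h6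
                  have e1 : PySem.Chars.replace (c :: t) ['c', 't', 'r', 'l', '+'] ['C', '-'] = c :: PySem.Chars.replace (t) ['c', 't', 'r', 'l', '+'] ['C', '-'] :=
                    rep_cons_neg ['c', 't', 'r', 'l', '+'] ['C', '-'] (by decide) c (t) hF1
                  have hp2 : List.isPrefixOf ['s', 'h', 'i', 'f', 't', '+'] (c :: PySem.Chars.replace (t) ['c', 't', 'r', 'l', '+'] ['C', '-']) = false := by
                    by_contra hcon
                    have hb : List.isPrefixOf ['s', 'h', 'i', 'f', 't', '+'] (c :: PySem.Chars.replace (t) ['c', 't', 'r', 'l', '+'] ['C', '-']) = true := by simpa using hcon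
                    simp only [List.isPrefixOf, Bool.and_eq_true, beq_iff_eq] at hb
                    have htr0 : List.isPrefixOf ['h', 'i', 'f', 't', '+'] (PySem.Chars.replace (t) ['c', 't', 'r', 'l', '+'] ['C', '-']) = true := hb.2
                    have htr1 : List.isPrefixOf ['h', 'i', 'f', 't', '+'] (t) = true :=
                      rep_trans ['c', 't', 'r', 'l', '+'] (by decide) 'C' ['-'] (t).length (t) ['h', 'i', 'f', 't', '+'] le_rfl (by decide) htr0
                    have hK : List.isPrefixOf ['s', 'h', 'i', 'f', 't', '+'] (c :: t) = true := by
                      simp only [List.isPrefixOf, Bool.and_eq_true, beq_iff_eq]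
                      exact ⟨hb.1, htr1⟩
                    simp [hK] at hF2
                  have e2 : PySem.Chars.replace (c :: PySem.Chars.replace (t) ['c', 't', 'r', 'l', '+'] ['C', '-']) ['s', 'h', 'i', 'f', 't', '+'] ['S', '-'] = c :: PySem.Chars.replace (PySem.Chars.replace (t) ['c', 't', 'r', 'l', '+'] ['C', '-']) ['s', 'h', 'i', 'f', 't', '+'] ['S', '-'] :=
                    rep_cons_neg ['s', 'h', 'i', 'f', 't', '+'] ['S', '-'] (by decide) c (PySem.Chars.replace (t) ['c', 't', 'r', 'l', '+'] ['C', '-']) hp2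
                  have hp3 : List.isPrefixOf ['a', 'l', 't', '+'] (c :: PySem.Chars.replace (PySem.Chars.replace (t) ['c', 't', 'r', 'l', '+'] ['C', '-']) ['s', 'h', 'i', 'f', 't', '+'] ['S', '-']) = false := by
                    by_contra hcon
                    have hb : List.isPrefixOf ['a', 'l', 't', '+'] (c :: PySem.Chars.replace (PySem.Chars.replace (t) ['c', 't', 'r', 'l', '+'] ['C', '-']) ['s', 'h', 'i', 'f', 't', '+'] ['S', '-']) = true := by simpa using hcon
                    simp only [List.isPrefixOf, Bool.and_eq_true, beq_iff_eq] at hb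
                    have htr0 : List.isPrefixOf ['l', 't', '+'] (PySem.Chars.replace (PySem.Chars.replace (t) ['c', 't', 'r', 'l', '+'] ['C', '-']) ['s', 'h', 'i', 'f', 't', '+'] ['S', '-']) = true := hb.2
                    have htr1 : List.isPrefixOf ['l', 't', '+'] (PySem.Chars.replace (t) ['c', 't', 'r', 'l', '+'] ['C', '-']) = true :=
                      rep_trans ['s', 'h', 'i', 'f', 't', '+'] (by decide) 'S' ['-'] (PySem.Chars.replace (t) ['c', 't', 'r', 'l', '+'] ['C', '-']).length (PySem.Chars.replace (t) ['c', 't', 'r', 'l', '+'] ['C', '-']) ['l', 't', '+'] le_rfl (by decide) htr0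
                    have htr2 : List.isPrefixOf ['l', 't', '+'] (t) = true :=
                      rep_trans ['c', 't', 'r', 'l', '+'] (by decide) 'C' ['-'] (t).length (t) ['l', 't', '+'] le_rfl (by decide) htr1
                    have hK : List.isPrefixOf ['a', 'l', 't', '+'] (c :: t) = true := by
                      simp only [List.isPrefixOf, Bool.and_eq_true, beq_iff_eq]
                      exact ⟨hb.1, htr2⟩
                    simp [hK] at hF3
                  have e3 : PySem.Chars.replace (c :: PySem.Chars.replace (PySem.Chars.replace (t) ['c', 't', 'r', 'l', '+'] ['C', '-']) ['s', 'h', 'i', 'f', 't', '+'] ['S', '-']) ['a', 'l', 't', '+'] ['A', '-'] = c :: PySem.Chars.replace (PySem.Chars.replace (PySem.Chars.replace (t) ['c', 't', 'r', 'l', '+'] ['C', '-']) ['s', 'h', 'i', 'f', 't', '+'] ['S', '-']) ['a', 'l', 't', '+'] ['A', '-'] :=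
                    rep_cons_neg ['a', 'l', 't', '+'] ['A', '-'] (by decide) c (PySem.Chars.replace (PySem.Chars.replace (t) ['c', 't', 'r', 'l', '+'] ['C', '-']) ['s', 'h', 'i', 'f', 't', '+'] ['S', '-']) hp3
                  have hp4 : List.isPrefixOf ['e', 's', 'c', 'a', 'p', 'e'] (c :: PySem.Chars.replace (PySem.Chars.replace (PySem.Chars.replace (t) ['c', 't', 'r', 'l', '+'] ['C', '-']) ['s', 'h', 'i', 'f', 't', '+'] ['S', '-']) ['a', 'l', 't', '+'] ['A', '-']) = false := by
                    by_contra hcon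
                    have hb : List.isPrefixOf ['e', 's', 'c', 'a', 'p', 'e'] (c :: PySem.Chars.replace (PySem.Chars.replace (PySem.Chars.replace (t) ['c', 't', 'r', 'l', '+'] ['C', '-']) ['s', 'h', 'i', 'f', 't', '+'] ['S', '-']) ['a', 'l', 't', '+'] ['A', '-']) = true := by simpa using hcon
                    simp only [List.isPrefixOf, Bool.and_eq_true, beq_iff_eq] at hb
                    have htr0 : List.isPrefixOf ['s', 'c', 'a', 'p', 'e'] (PySem.Chars.replace (PySem.Chars.replace (PySem.Chars.replace (t) ['c', 't', 'r', 'l', '+'] ['C', '-']) ['s', 'h', 'i', 'f', 't', '+'] ['S', '-']) ['a', 'l', 't', '+'] ['A', '-']) = true := hb.2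
                    have htr1 : List.isPrefixOf ['s', 'c', 'a', 'p', 'e'] (PySem.Chars.replace (PySem.Chars.replace (t) ['c', 't', 'r', 'l', '+'] ['C', '-']) ['s', 'h', 'i', 'f', 't', '+'] ['S', '-']) = true :=
                      rep_trans ['a', 'l', 't', '+'] (by decide) 'A' ['-'] (PySem.Chars.replace (PySem.Chars.replace (t) ['c', 't', 'r', 'l', '+'] ['C', '-']) ['s', 'h', 'i', 'f', 't', '+'] ['S', '-']).length (PySem.Chars.replace (PySem.Chars.replace (t) ['c', 't', 'r', 'l', '+'] ['C', '-']) ['s', 'h', 'i', 'f', 't', '+'] ['S', '-']) ['s', 'c', 'a', 'p', 'e'] le_rfl (by decide) htr0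
                    have htr2 : List.isPrefixOf ['s', 'c', 'a', 'p', 'e'] (PySem.Chars.replace (t) ['c', 't', 'r', 'l', '+'] ['C', '-']) = true :=
                      rep_trans ['s', 'h', 'i', 'f', 't', '+'] (by decide) 'S' ['-'] (PySem.Chars.replace (t) ['c', 't', 'r', 'l', '+'] ['C', '-']).length (PySem.Chars.replace (t) ['c', 't', 'r', 'l', '+'] ['C', '-']) ['s', 'c', 'a', 'p', 'e'] le_rfl (by decide) htr1
                    have htr3 : List.isPrefixOf ['s', 'c', 'a', 'p', 'e'] (t) = true :=
                      rep_trans ['c', 't', 'r', 'l', '+'] (by decide) 'C' ['-'] (t).length (t) ['s', 'c', 'a', 'p', 'e'] le_rfl (by decide) htr2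
                    have hK : List.isPrefixOf ['e', 's', 'c', 'a', 'p', 'e'] (c :: t) = true := by
                      simp only [List.isPrefixOf, Bool.and_eq_true, beq_iff_eq]
                      exact ⟨hb.1, htr3⟩
                    simp [hK] at hF4
                  have e4 : PySem.Chars.replace (c :: PySem.Chars.replace (PySem.Chars.replace (PySem.Chars.replace (t) ['c', 't', 'r', 'l', '+'] ['C', '-']) ['s', 'h', 'i', 'f', 't', '+'] ['S', '-']) ['a', 'l', 't', '+'] ['A', '-']) ['e', 's', 'c', 'a', 'p', 'e'] ['E', 's', 'c'] = c :: PySem.Chars.replace (PySem.Chars.replace (PySem.Chars.replace (PySem.Chars.replace (t) ['c', 't', 'r', 'l', '+'] ['C', '-']) ['s', 'h', 'i', 'f', 't', '+'] ['S', '-']) ['a', 'l', 't', '+'] ['A', '-']) ['e', 's', 'c', 'a', 'p', 'e'] ['E', 's', 'c'] :=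
                    rep_cons_neg ['e', 's', 'c', 'a', 'p', 'e'] ['E', 's', 'c'] (by decide) c (PySem.Chars.replace (PySem.Chars.replace (PySem.Chars.replace (t) ['c', 't', 'r', 'l', '+'] ['C', '-']) ['s', 'h', 'i', 'f', 't', '+'] ['S', '-']) ['a', 'l', 't', '+'] ['A', '-']) hp4
                  have hp5 : List.isPrefixOf ['e', 'n', 't', 'e', 'r'] (c :: PySem.Chars.replace (PySem.Chars.replace (PySem.Chars.replace (PySem.Chars.replace (t) ['c', 't', 'r', 'l', '+'] ['C', '-']) ['s', 'h', 'i', 'f', 't', '+'] ['S', '-']) ['a', 'l', 't', '+'] ['A', '-']) ['e', 's', 'c', 'a', 'p', 'e'] ['E', 's', 'c']) = false := by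
                    by_contra hcon
                    have hb : List.isPrefixOf ['e', 'n', 't', 'e', 'r'] (c :: PySem.Chars.replace (PySem.Chars.replace (PySem.Chars.replace (PySem.Chars.replace (t) ['c', 't', 'r', 'l', '+'] ['C', '-']) ['s', 'h', 'i', 'f', 't', '+'] ['S', '-']) ['a', 'l', 't', '+'] ['A', '-']) ['e', 's', 'c', 'a', 'p', 'e'] ['E', 's', 'c']) = true := by simpa using hcon
                    simp only [List.isPrefixOf, Bool.and_eq_true, beq_iff_eq] at hb
                    have htr0 : List.isPrefixOf ['n', 't', 'e', 'r'] (PySem.Chars.replace (PySem.Chars.replace (PySem.Chars.replace (PySem.Chars.replace (t) ['c', 't', 'r', 'l', '+'] ['C', '-']) ['s', 'h', 'i', 'f', 't', '+'] ['S', '-']) ['a', 'l', 't', '+'] ['A', '-']) ['e', 's', 'c', 'a', 'p', 'e'] ['E', 's', 'c']) = true := hb.2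
                    have htr1 : List.isPrefixOf ['n', 't', 'e', 'r'] (PySem.Chars.replace (PySem.Chars.replace (PySem.Chars.replace (t) ['c', 't', 'r', 'l', '+'] ['C', '-']) ['s', 'h', 'i', 'f', 't', '+'] ['S', '-']) ['a', 'l', 't', '+'] ['A', '-']) = true :=
                      rep_trans ['e', 's', 'c', 'a', 'p', 'e'] (by decide) 'E' ['s', 'c'] (PySem.Chars.replace (PySem.Chars.replace (PySem.Chars.replace (t) ['c', 't', 'r', 'l', '+'] ['C', '-']) ['s', 'h', 'i', 'f', 't', '+'] ['S', '-']) ['a', 'l', 't', '+'] ['A', '-']).length (PySem.Chars.replace (PySem.Chars.replace (PySem.Chars.replace (t) ['c', 't', 'r', 'l', '+'] ['C', '-']) ['s', 'h', 'i', 'f', 't', '+'] ['S', '-']) ['a', 'l', 't', '+'] ['A', '-']) ['n', 't', 'e', 'r'] le_rfl (by decide) htr0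
                    have htr2 : List.isPrefixOf ['n', 't', 'e', 'r'] (PySem.Chars.replace (PySem.Chars.replace (t) ['c', 't', 'r', 'l', '+'] ['C', '-']) ['s', 'h', 'i', 'f', 't', '+'] ['S', '-']) = true :=
                      rep_trans ['a', 'l', 't', '+'] (by decide) 'A' ['-'] (PySem.Chars.replace (PySem.Chars.replace (t) ['c', 't', 'r', 'l', '+'] ['C', '-']) ['s', 'h', 'i', 'f', 't', '+'] ['S', '-']).length (PySem.Chars.replace (PySem.Chars.replace (t) ['c', 't', 'r', 'l', '+'] ['C', '-']) ['s', 'h', 'i', 'f', 't', '+'] ['S', '-']) ['n', 't', 'e', 'r'] le_rfl (by decide) htr1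
                    have htr3 : List.isPrefixOf ['n', 't', 'e', 'r'] (PySem.Chars.replace (t) ['c', 't', 'r', 'l', '+'] ['C', '-']) = true :=
                      rep_trans ['s', 'h', 'i', 'f', 't', '+'] (by decide) 'S' ['-'] (PySem.Chars.replace (t) ['c', 't', 'r', 'l', '+'] ['C', '-']).length (PySem.Chars.replace (t) ['c', 't', 'r', 'l', '+'] ['C', '-']) ['n', 't', 'e', 'r'] le_rfl (by decide) htr2
                    have htr4 : List.isPrefixOf ['n', 't', 'e', 'r'] (t) = true :=
                      rep_trans ['c', 't', 'r', 'l', '+'] (by decide) 'C' ['-'] (t).length (t) ['n', 't', 'e', 'r'] le_rfl (by decide) htr3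
                    have hK : List.isPrefixOf ['e', 'n', 't', 'e', 'r'] (c :: t) = true := by
                      simp only [List.isPrefixOf, Bool.and_eq_true, beq_iff_eq]
                      exact ⟨hb.1, htr4⟩
                    simp [hK] at hF5
                  have e5 : PySem.Chars.replace (c :: PySem.Chars.replace (PySem.Chars.replace (PySem.Chars.replace (PySem.Chars.replace (t) ['c', 't', 'r', 'l', '+'] ['C', '-']) ['s', 'h', 'i', 'f', 't', '+'] ['S', '-']) ['a', 'l', 't', '+'] ['A', '-']) ['e', 's', 'c', 'a', 'p', 'e'] ['E', 's', 'c']) ['e', 'n', 't', 'e', 'r'] ['E', 'n', 't', 'e', 'r'] = c :: PySem.Chars.replace (PySem.Chars.replace (PySem.Chars.replace (PySem.Chars.replace (PySem.Chars.replace (t) ['c', 't', 'r', 'l', '+'] ['C', '-']) ['s', 'h', 'i', 'f', 't', '+'] ['S', '-']) ['a', 'l', 't', '+'] ['A', '-']) ['e', 's', 'c', 'a', 'p', 'e'] ['E', 's', 'c']) ['e', 'n', 't', 'e', 'r'] ['E', 'n', 't', 'e', 'r'] :=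
                    rep_cons_neg ['e', 'n', 't', 'e', 'r'] ['E', 'n', 't', 'e', 'r'] (by decide) c (PySem.Chars.replace (PySem.Chars.replace (PySem.Chars.replace (PySem.Chars.replace (t) ['c', 't', 'r', 'l', '+'] ['C', '-']) ['s', 'h', 'i', 'f', 't', '+'] ['S', '-']) ['a', 'l', 't', '+'] ['A', '-']) ['e', 's', 'c', 'a', 'p', 'e'] ['E', 's', 'c']) hp5
                  have hp6 : List.isPrefixOf ['t', 'a', 'b'] (c :: PySem.Chars.replace (PySem.Chars.replace (PySem.Chars.replace (PySem.Chars.replace (PySem.Chars.replace (t) ['c', 't', 'r', 'l', '+'] ['C', '-']) ['s', 'h', 'i', 'f', 't', '+'] ['S', '-']) ['a', 'l', 't', '+'] ['A', '-']) ['e', 's', 'c', 'a', 'p', 'e'] ['E', 's', 'c']) ['e', 'n', 't', 'e', 'r'] ['E', 'n', 't', 'e', 'r']) = false := by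
                    by_contra hcon
                    have hb : List.isPrefixOf ['t', 'a', 'b'] (c :: PySem.Chars.replace (PySem.Chars.replace (PySem.Chars.replace (PySem.Chars.replace (PySem.Chars.replace (t) ['c', 't', 'r', 'l', '+'] ['C', '-']) ['s', 'h', 'i', 'f', 't', '+'] ['S', '-']) ['a', 'l', 't', '+'] ['A', '-']) ['e', 's', 'c', 'a', 'p', 'e'] ['E', 's', 'c']) ['e', 'n', 't', 'e', 'r'] ['E', 'n', 't', 'e', 'r']) = true := by simpa using hcon
                    simp only [List.isPrefixOf, Bool.and_eq_true, beq_iff_eq] at hb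
                    have htr0 : List.isPrefixOf ['a', 'b'] (PySem.Chars.replace (PySem.Chars.replace (PySem.Chars.replace (PySem.Chars.replace (PySem.Chars.replace (t) ['c', 't', 'r', 'l', '+'] ['C', '-']) ['s', 'h', 'i', 'f', 't', '+'] ['S', '-']) ['a', 'l', 't', '+'] ['A', '-']) ['e', 's', 'c', 'a', 'p', 'e'] ['E', 's', 'c']) ['e', 'n', 't', 'e', 'r'] ['E', 'n', 't', 'e', 'r']) = true := hb.2
                    have htr1 : List.isPrefixOf ['a', 'b'] (PySem.Chars.replace (PySem.Chars.replace (PySem.Chars.replace (PySem.Chars.replace (t) ['c', 't', 'r', 'l', '+'] ['C', '-']) ['s', 'h', 'i', 'f', 't', '+'] ['S', '-']) ['a', 'l', 't', '+'] ['A', '-']) ['e', 's', 'c', 'a', 'p', 'e'] ['E', 's', 'c']) = true :=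
                      rep_trans ['e', 'n', 't', 'e', 'r'] (by decide) 'E' ['n', 't', 'e', 'r'] (PySem.Chars.replace (PySem.Chars.replace (PySem.Chars.replace (PySem.Chars.replace (t) ['c', 't', 'r', 'l', '+'] ['C', '-']) ['s', 'h', 'i', 'f', 't', '+'] ['S', '-']) ['a', 'l', 't', '+'] ['A', '-']) ['e', 's', 'c', 'a', 'p', 'e'] ['E', 's', 'c']).length (PySem.Chars.replace (PySem.Chars.replace (PySem.Chars.replace (PySem.Chars.replace (t) ['c', 't', 'r', 'l', '+'] ['C', '-']) ['s', 'h', 'i', 'f', 't', '+'] ['S', '-']) ['a', 'l', 't', '+'] ['A', '-']) ['e', 's', 'c', 'a', 'p', 'e'] ['E', 's', 'c']) ['a', 'b'] le_rfl (by decide) htr0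
                    have htr2 : List.isPrefixOf ['a', 'b'] (PySem.Chars.replace (PySem.Chars.replace (PySem.Chars.replace (t) ['c', 't', 'r', 'l', '+'] ['C', '-']) ['s', 'h', 'i', 'f', 't', '+'] ['S', '-']) ['a', 'l', 't', '+'] ['A', '-']) = true :=
                      rep_trans ['e', 's', 'c', 'a', 'p', 'e'] (by decide) 'E' ['s', 'c'] (PySem.Chars.replace (PySem.Chars.replace (PySem.Chars.replace (t) ['c', 't', 'r', 'l', '+'] ['C', '-']) ['s', 'h', 'i', 'f', 't', '+'] ['S', '-']) ['a', 'l', 't', '+'] ['A', '-']).length (PySem.Chars.replace (PySem.Chars.replace (PySem.Chars.replace (t) ['c', 't', 'r', 'l', '+'] ['C', '-']) ['s', 'h', 'i', 'f', 't', '+'] ['S', '-']) ['a', 'l', 't', '+'] ['A', '-']) ['a', 'b'] le_rfl (by decide) htr1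
                    have htr3 : List.isPrefixOf ['a', 'b'] (PySem.Chars.replace (PySem.Chars.replace (t) ['c', 't', 'r', 'l', '+'] ['C', '-']) ['s', 'h', 'i', 'f', 't', '+'] ['S', '-']) = true :=
                      rep_trans ['a', 'l', 't', '+'] (by decide) 'A' ['-'] (PySem.Chars.replace (PySem.Chars.replace (t) ['c', 't', 'r', 'l', '+'] ['C', '-']) ['s', 'h', 'i', 'f', 't', '+'] ['S', '-']).length (PySem.Chars.replace (PySem.Chars.replace (t) ['c', 't', 'r', 'l', '+'] ['C', '-']) ['s', 'h', 'i', 'f', 't', '+'] ['S', '-']) ['a', 'b'] le_rfl (by decide) htr2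
                    have htr4 : List.isPrefixOf ['a', 'b'] (PySem.Chars.replace (t) ['c', 't', 'r', 'l', '+'] ['C', '-']) = true :=
                      rep_trans ['s', 'h', 'i', 'f', 't', '+'] (by decide) 'S' ['-'] (PySem.Chars.replace (t) ['c', 't', 'r', 'l', '+'] ['C', '-']).length (PySem.Chars.replace (t) ['c', 't', 'r', 'l', '+'] ['C', '-']) ['a', 'b'] le_rfl (by decide) htr3
                    have htr5 : List.isPrefixOf ['a', 'b'] (t) = true :=
                      rep_trans ['c', 't', 'r', 'l', '+'] (by decide) 'C' ['-'] (t).length (t) ['a', 'b'] le_rfl (by decide) htr4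
                    have hK : List.isPrefixOf ['t', 'a', 'b'] (c :: t) = true := by
                      simp only [List.isPrefixOf, Bool.and_eq_true, beq_iff_eq]
                      exact ⟨hb.1, htr5⟩
                    simp [hK] at hF6
                  have e6 : PySem.Chars.replace (c :: PySem.Chars.replace (PySem.Chars.replace (PySem.Chars.replace (PySem.Chars.replace (PySem.Chars.replace (t) ['c', 't', 'r', 'l', '+'] ['C', '-']) ['s', 'h', 'i', 'f', 't', '+'] ['S', '-']) ['a', 'l', 't', '+'] ['A', '-']) ['e', 's', 'c', 'a', 'p', 'e'] ['E', 's', 'c']) ['e', 'n', 't', 'e', 'r'] ['E', 'n', 't', 'e', 'r']) ['t', 'a', 'b'] ['T', 'a', 'b'] = c :: PySem.Chars.replace (PySem.Chars.replace (PySem.Chars.replace (PySem.Chars.replace (PySem.Chars.replace (PySem.Chars.replace (t) ['c', 't', 'r', 'l', '+'] ['C', '-']) ['s', 'h', 'i', 'f', 't', '+'] ['S', '-']) ['a', 'l', 't', '+'] ['A', '-']) ['e', 's', 'c', 'a', 'p', 'e'] ['E', 's', 'c']) ['e', 'n', 't', 'e', 'r'] ['E', 'n', 't', 'e', 'r'])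 ['t', 'a', 'b'] ['T', 'a', 'b'] :=
                    rep_cons_neg ['t', 'a', 'b'] ['T', 'a', 'b'] (by decide) c (PySem.Chars.replace (PySem.Chars.replace (PySem.Chars.replace (PySem.Chars.replace (PySem.Chars.replace (t) ['c', 't', 'r', 'l', '+'] ['C', '-']) ['s', 'h', 'i', 'f', 't', '+'] ['S', '-']) ['a', 'l', 't', '+'] ['A', '-']) ['e', 's', 'c', 'a', 'p', 'e'] ['E', 's', 'c']) ['e', 'n', 't', 'e', 'r'] ['E', 'n', 't', 'e', 'r']) hp6
                  rw [fkScan_cons]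
                  simp only [hF1, hF2, hF3, hF4, hF5, hF6, Bool.false_eq_true, if_false]
                  simp only [fkA6]
                  rw [e1, e2, e3, e4, e5, e6]
                  have hiht := ih t ht
                  simp only [fkA6] at hiht
                  rw [hiht]

-- ===== VERDICT (by name: the statement is the Claim_ definition above) =====
theorem format_key_py_spec : Claim_equal_format_key_py := by
  intro key _
  unfold Spec_format_key_py format_key_py format_key_py_alt
  have hr : PySem.Str.replace (PySem.Str.replace (PySem.Str.replace (PySem.Str.replace
      (PySem.Str.replace (PySem.Str.replace key "ctrl+" "C-") "shift+" "S-") "alt+" "A-")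
      "escape" "Esc") "enter" "Enter") "tab" "Tab" = String.ofList (fkScan key.toList) := by
    rw [← String.toList_inj]
    simp only [PySem.Str.toList_replace, String.toList_ofList]
    exact fk_main key.toList.length key.toList le_rfl
  show (let result := PySem.Str.replace (PySem.Str.replace (PySem.Str.replace (PySem.Str.replace
      (PySem.Str.replace (PySem.Str.replace key "ctrl+" "C-") "shift+" "S-") "alt+" "A-")
      "escape" "Esc") "enter" "Enter") "tab" "Tab";
    if PySem.Str.len result == 1 then PySem.Str.upper result else result) =
    (let result := String.ofList (fkScan key.toList);
    if PySem.Str.len result == 1 then PySem.Str.upper result else result)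
  simp only [hr]
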